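-- pv_equiv track=rewrite | github.com/HSZemi/vs-bonn | createHtml.py | generate_navtree
-- ===== SOURCE A (Python) =====
-- def path_to_top(level):
-- 	if(level == 0):
-- 		return "./"
-- 	else:
-- 		return "../" * (level)
--
-- def generate_navtree(names, filterprefix, level):
-- 	order = {}
-- 	for(prefix, name, _) in names:
-- 		if(prefix.startswith(filterprefix)):
-- 			if prefix not in order:
-- 				order[prefix] = []
-- 			order[prefix].append(name)
--
-- 	navtree = ""
-- 	for key in sorted(order):
-- 		navtree += "<b><a href='{0}{1}'>{1}</a></b>\n<ul>".format(path_to_top(level),key)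
-- 		for item in order[key]:
-- 			navtree += "<li><a href='{0}{1}/{2}.html'>{2}</a></li>\n".format(path_to_top(level), key, item)
-- 		navtree += "</ul>\n"
-- 	return navtree
-- ===== SOURCE B (Python) =====
-- def generate_navtree(names, filterprefix, level):
--     keys = sorted({p for (p, _, _) in names if p.startswith(filterprefix)})
--     if not keys:
--         return ""
--     top = "./" if level == 0 else "../" * level
--     parts = []
--     for key in keys:
--         parts.append("<b><a href='{0}{1}'>{1}</a></b>\n<ul>".format(top, key))
--         parts.extend("<li><a href='{0}{1}/{2}.html'>{2}</a></li>\n".format(top, key, name)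
--                      for (p, name, _) in names if p == key)
--         parts.append("</ul>\n")
--     return "".join(parts)
-- ===== Notes on version B (the rewrite author's own statement) =====
-- stated objective: alternative
-- what changed: A builds a prefix->names dict in one pass and then walks its sorted keys; B never builds a dict: it sorts the distinct filtered prefixes (returning '' early when there are none), rescans the input once per key for that key's names, and joins the collected parts at the end.
import Mathlib
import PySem

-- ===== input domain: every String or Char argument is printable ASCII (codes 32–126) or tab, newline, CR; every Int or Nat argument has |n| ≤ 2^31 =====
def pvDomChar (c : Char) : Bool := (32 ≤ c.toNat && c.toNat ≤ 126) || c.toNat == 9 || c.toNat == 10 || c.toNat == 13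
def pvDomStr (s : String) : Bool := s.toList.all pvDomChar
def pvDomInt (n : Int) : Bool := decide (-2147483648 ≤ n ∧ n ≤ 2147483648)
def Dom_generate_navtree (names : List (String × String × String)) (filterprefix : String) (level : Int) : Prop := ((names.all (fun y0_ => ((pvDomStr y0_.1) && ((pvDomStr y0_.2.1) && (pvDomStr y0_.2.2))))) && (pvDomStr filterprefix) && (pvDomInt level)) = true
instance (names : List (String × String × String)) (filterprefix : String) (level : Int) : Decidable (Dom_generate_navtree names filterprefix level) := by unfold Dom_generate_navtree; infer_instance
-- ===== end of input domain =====

-- B replaces A's one-pass dict grouping by sorted distinct keys plus a per-key scan of the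
-- input and a final join of collected parts (objective: an alternative decomposition; no speed claim).

-- ===== PORT A =====
-- "../" * level : Python string repetition (empty for level ≤ 0, hence .toNat is exact)
def path_to_top (level : Int) : String :=
  if level == 0 then "./" else String.join (List.replicate level.toNat "../")

def generate_navtree (names : List (String × String × String)) (filterprefix : String) (level : Int) : String :=
  let order : PySem.Dict String (List String) := names.foldl (fun order t =>
    if PySem.Str.startswith t.1 filterprefix then
      -- if prefix not in order: order[prefix] = [] ; order[prefix].append(name)
      let order := if order.contains t.1 then order else order.insert t.1 []
      order.modify t.1 [] (fun l => l ++ [t.2.1])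
    else order) PySem.Dict.empty
  (PySem.List.sorted order.keys id).foldl (fun navtree key =>
    let navtree := navtree ++ ("<b><a href='" ++ path_to_top level ++ key ++ "'>" ++ key ++ "</a></b>\n<ul>")
    -- order[key]: key is always a present key here, so total getD renders it exactly
    let navtree := (order.getD key []).foldl (fun navtree item =>
      navtree ++ ("<li><a href='" ++ path_to_top level ++ key ++ "/" ++ item ++ ".html'>" ++ item ++ "</a></li>\n")) navtree
    navtree ++ "</ul>\n") ""

-- ===== PORT B =====
def generate_navtree_alt (names : List (String × String × String)) (filterprefix : String) (level : Int) : String :=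
  let keys := PySem.List.sorted
    (PySem.Set.ofList ((names.filter (fun t => PySem.Str.startswith t.1 filterprefix)).map (fun t => t.1))) id
  if keys = [] then "" else
  let top := if level == 0 then "./" else String.join (List.replicate level.toNat "../")
  let parts := keys.foldl (fun parts key =>
    let parts := parts ++ [("<b><a href='" ++ top ++ key ++ "'>" ++ key ++ "</a></b>\n<ul>")]
    let parts := parts ++ ((names.filter (fun t => t.1 == key)).map (fun t =>
      ("<li><a href='" ++ top ++ key ++ "/" ++ t.2.1 ++ ".html'>" ++ t.2.1 ++ "</a></li>\n")))
    parts ++ ["</ul>\n"]) []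
  PySem.Str.join "" parts

-- ===== PRECONDITION & SPEC =====
def Spec_generate_navtree (names : List (String × String × String)) (filterprefix : String) (level : Int) (out : String) : Prop := out = generate_navtree_alt names filterprefix level
instance (names : List (String × String × String)) (filterprefix : String) (level : Int) (out : String) : Decidable (Spec_generate_navtree names filterprefix level out) := by unfold Spec_generate_navtree; infer_instance

-- ===== CLAIM (what is proved, stated in full; the proofs are below) =====
def Claim_equal_generate_navtree : Prop := ∀ (names : List (String × String × String)) (filterprefix : String) (level : Int), Dom_generate_navtree names filterprefix level → Spec_generate_navtree names filterprefix level (generate_navtree names filterprefix level)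

-- ===== LEMMAS AND PROOFS =====

theorem pvJoinFlatten : ∀ l : List (List Char), PySem.Chars.join [] l = l.flatten
  | [] => by simp [PySem.Chars.join, List.intercalate]
  | [a] => by simp [PySem.Chars.join, List.intercalate]
  | a :: b :: t => by
      rw [PySem.Chars.join_cons_cons]
      simp [pvJoinFlatten (b :: t)]

theorem pvJoinCons (s : String) (l : List String) :
    PySem.Str.join "" (s :: l) = s ++ PySem.Str.join "" l := by
  simp [PySem.Str.join, pvJoinFlatten, String.ofList_append]

theorem pvJoinNil : PySem.Str.join "" ([] : List String) = "" := by
  simp [PySem.Str.join]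

theorem pvJoinAppend (l₁ l₂ : List String) :
    PySem.Str.join "" (l₁ ++ l₂) = PySem.Str.join "" l₁ ++ PySem.Str.join "" l₂ := by
  simp [PySem.Str.join, pvJoinFlatten, String.ofList_append]

-- a string-appending foldl is the join of the mapped pieces
theorem pvStrFoldl {α : Type} (f : α → String) : ∀ (l : List α) (a : String),
    l.foldl (fun s x => s ++ f x) a = a ++ PySem.Str.join "" (l.map f)
  | [], a => by simp [pvJoinNil]
  | x :: l, a => by
      simp only [List.foldl_cons, List.map_cons, pvStrFoldl f l, pvJoinCons,
        String.append_assoc]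

-- A's "setdefault then append" step is a single modify-with-default
theorem pvStep_eq (d : PySem.Dict String (List String)) (t : String × String × String) :
    (let d' := if d.contains t.1 then d else d.insert t.1 []
     d'.modify t.1 [] (fun l => l ++ [t.2.1]))
    = d.modify t.1 [] (fun l => l ++ [t.2.1]) := by
  by_cases h : d.contains t.1
  · simp [h]
  · simp only [h, Bool.false_eq_true, ↓reduceIte, PySem.Dict.modify,
      PySem.Dict.getD_insert_self, PySem.Dict.insert_insert_self,
      PySem.Dict.getD_of_not_contains d [] (by simpa using h)]

-- the generic fold bridge: string accumulation (A) vs. parts-list accumulation (B)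
theorem pvFoldGen (B : String → String) (Pb : String → List String) :
    ∀ (keys : List String), (∀ k ∈ keys, B k = PySem.Str.join "" (Pb k)) →
    ∀ (nav : String) (parts : List String), nav = PySem.Str.join "" parts →
    keys.foldl (fun nav k => nav ++ B k) nav
      = PySem.Str.join "" (keys.foldl (fun ps k => ps ++ Pb k) parts)
  | [], _, nav, parts, h => by simpa using h
  | k :: keys, hB, nav, parts, h => by
      simp only [List.foldl_cons]
      exact pvFoldGen B Pb keys (fun k hk => hB k (List.mem_cons_of_mem _ hk))
        (nav ++ B k) (parts ++ Pb k)
        (by rw [pvJoinAppend, h, hB k List.mem_cons_self])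

theorem pvMain (names : List (String × String × String)) (filterprefix : String) (level : Int) :
    generate_navtree names filterprefix level = generate_navtree_alt names filterprefix level := by
  simp only [generate_navtree, generate_navtree_alt, path_to_top]
  set top := (if level == 0 then "./" else String.join (List.replicate level.toNat "../")) with htop
  set F := names.filter (fun t => PySem.Str.startswith t.1 filterprefix) with hF
  set P := F.map (fun t => (t.1, t.2.1)) with hP
  have horder : (names.foldl (fun order t =>
      if PySem.Str.startswith t.1 filterprefix then
        let order := if order.contains t.1 then order else order.insert t.1 []
        order.modify t.1 [] (fun l => l ++ [t.2.1])
      else order) PySem.Dict.empty)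
      = P.foldl (fun d p => d.modify p.1 [] (fun l => l ++ [p.2])) PySem.Dict.empty := by
    rw [hP, List.foldl_map, hF, ← List.foldl_filter]
    exact PySem.List.foldl_congr_mem _ _ _ _ (fun acc x _ => pvStep_eq acc x)
  rw [horder]
  have hkeys : (P.foldl (fun d p => d.modify p.1 [] (fun l => l ++ [p.2])) PySem.Dict.empty).keys
      = PySem.Set.ofList (F.map (fun t => t.1)) := by
    have h := PySem.Dict.keys_foldl_modify_key P Prod.fst ([] : List String)
      (fun _ p => fun l => l ++ [p.2]) PySem.Dict.empty
    rw [h]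
    show PySem.Set.update ([] : PySem.Set String) (P.map Prod.fst) = _
    rw [PySem.Set.update_nil_left, hP, List.map_map]
    rfl
  have hget : ∀ k, (P.foldl (fun d p => d.modify p.1 [] (fun l => l ++ [p.2])) PySem.Dict.empty).getD k []
      = (F.filter (fun t => t.1 == k)).map (fun t => t.2.1) := by
    intro k
    rw [PySem.Dict.getD_foldl_modify_append]
    show [] ++ _ = _
    rw [List.nil_append, hP, List.filter_map, List.map_map]
    rfl
  rw [hkeys]
  simp only [hget]
  by_cases hk0 : PySem.List.sorted (PySem.Set.ofList (F.map (fun t => t.1))) id = []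
  · rw [if_pos hk0, hk0, List.foldl_nil]
  rw [if_neg hk0]
  have hsw : ∀ k ∈ PySem.List.sorted (PySem.Set.ofList (F.map (fun t => t.1))) id false,
      PySem.Str.startswith k filterprefix = true := by
    intro k hk
    rw [PySem.List.mem_sorted] at hk
    rw [PySem.Set.mem_ofList] at hk
    obtain ⟨t, ht, rfl⟩ := List.mem_map.mp hk
    exact (List.mem_filter.mp ht).2
  have hfil : ∀ k, PySem.Str.startswith k filterprefix = true →
      F.filter (fun t => t.1 == k) = names.filter (fun t => t.1 == k) := by
    intro k hk
    rw [hF, List.filter_filter]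
    apply List.filter_congr
    intro t _
    by_cases h : t.1 = k
    · subst h; simp only [beq_self_eq_true, Bool.true_and]; exact hk
    · simp [h]
  rw [PySem.List.foldl_congr_mem _ _
      (fun nav k => nav ++ (("<b><a href='" ++ top ++ k ++ "'>" ++ k ++ "</a></b>\n<ul>")
        ++ PySem.Str.join "" ((names.filter (fun t => t.1 == k)).map (fun t =>
          ("<li><a href='" ++ top ++ k ++ "/" ++ t.2.1 ++ ".html'>" ++ t.2.1 ++ "</a></li>\n")))
        ++ "</ul>\n")) _
      (fun acc k hk => by
        simp only
        rw [pvStrFoldl, List.map_map, hfil k (hsw k hk)]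
        simp only [String.append_assoc]
        rfl)]
  rw [PySem.List.foldl_congr_mem _ _
      (fun ps k => ps ++ ([("<b><a href='" ++ top ++ k ++ "'>" ++ k ++ "</a></b>\n<ul>")]
        ++ (names.filter (fun t => t.1 == k)).map (fun t =>
          ("<li><a href='" ++ top ++ k ++ "/" ++ t.2.1 ++ ".html'>" ++ t.2.1 ++ "</a></li>\n"))
        ++ ["</ul>\n"])) _
      (fun acc k _ => by simp only [List.append_assoc])]
  apply pvFoldGen
  · intro k _
    rw [pvJoinAppend, pvJoinAppend, pvJoinCons, pvJoinNil, pvJoinCons, pvJoinNil,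
      String.append_empty, String.append_empty]
  · exact pvJoinNil.symm

-- ===== VERDICT (by name: the statement is the Claim_ definition above) =====
theorem generate_navtree_spec : Claim_equal_generate_navtree := by
  intro names filterprefix level _
  exact pvMain names filterprefix level
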